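-- pv_equiv track=rewrite | github.com/kulkarnisai/aoc2020 | d06/test_solution.py | FNAME2
-- ===== SOURCE A (Python) =====
-- def FNAME2(groups):
--     ans = 0
--     for group in groups:
--         intersection = group[0]
--         for user in group[1:]:
--             intersection = intersection & user
--         ans = ans + len(intersection)
--     return ans
-- ===== SOURCE B (Python) =====
-- def FNAME2(groups):
--     ans = 0
--     for group in groups:
--         counts = {}
--         for user in group:
--             for e in user:
--                 counts[e] = counts.get(e, 0) + 1
--         n = len(group)
--         ans += sum(1 for c in counts.values() if c == n)
--     return ans
-- ===== Notes on version B (the rewrite author's own statement) =====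
-- stated objective: alternative
-- what changed: Replaces the running set-intersection (group[0] then repeated '&') by one frequency dict over all users of the group and counts the distinct elements whose occurrence count equals the number of users.
import Mathlib
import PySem

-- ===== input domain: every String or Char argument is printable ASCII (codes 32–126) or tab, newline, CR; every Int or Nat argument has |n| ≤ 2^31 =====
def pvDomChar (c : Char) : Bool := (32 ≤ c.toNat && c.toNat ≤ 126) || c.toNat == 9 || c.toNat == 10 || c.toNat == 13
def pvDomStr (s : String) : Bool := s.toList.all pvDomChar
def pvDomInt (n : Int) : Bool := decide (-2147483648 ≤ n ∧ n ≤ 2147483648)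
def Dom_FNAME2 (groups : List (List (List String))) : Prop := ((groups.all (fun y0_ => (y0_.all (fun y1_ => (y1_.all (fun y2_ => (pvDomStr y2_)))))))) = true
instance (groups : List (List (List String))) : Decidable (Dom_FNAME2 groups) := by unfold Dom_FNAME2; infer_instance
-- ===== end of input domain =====

-- B replaces the running set-intersection by a per-group frequency dict and counts
-- elements whose occurrence count equals the number of users (objective: alternative).

-- ===== PORT A =====
-- each user set is a List String of distinct elements (PySem.Set representation);
-- group[1:] is PySem.List.slice from 1 = List.drop 1 (PySem.List.slice_from);
-- group[0] raises IndexError on an empty group — excluded by Pre_FNAME2 (getD [] is never reached inside Pre_).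
def FNAME2 (groups : List (List (List String))) : Int :=
  groups.foldl (fun ans group =>
    let intersection :=
      (group.drop 1).foldl (fun i u => PySem.Set.inter i u) ((PySem.List.pyGet? group 0).getD [])
    ans + (intersection.length : Int)) 0

-- ===== PORT B =====
def FNAME2_alt (groups : List (List (List String))) : Int :=
  groups.foldl (fun ans group =>
    let counts :=
      group.foldl (fun d u => u.foldl (fun d e => d.insert e (d.getD e 0 + 1)) d)
        (PySem.Dict.empty : PySem.Dict String Int)
    let n : Int := group.length
    ans + ((counts.values.filter (fun c => c == n)).length : Int)) 0

-- ===== PRECONDITION & SPEC =====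
-- Pre_ excludes (a) inputs containing an empty group, on which A raises IndexError at group[0],
-- and (b) inner lists with duplicate elements, which do not represent Python sets (the inputs are set[str]).
def Pre_FNAME2 (groups : List (List (List String))) : Prop :=
  (∀ g ∈ groups, g ≠ []) ∧ (∀ g ∈ groups, ∀ u ∈ g, u.Nodup)
instance (groups : List (List (List String))) : Decidable (Pre_FNAME2 groups) := by
  unfold Pre_FNAME2; infer_instance
def pvWitness_FNAME2 : List (List (List String)) := [[["a"], ["a", "b"]], [["b"]]]

def Spec_FNAME2 (groups : List (List (List String))) (out : Int) : Prop := out = FNAME2_alt groups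
instance (groups : List (List (List String))) (out : Int) : Decidable (Spec_FNAME2 groups out) := by unfold Spec_FNAME2; infer_instance

-- ===== CLAIM (what is proved, stated in full; the proofs are below) =====
def Claim_equal_FNAME2 : Prop := ∀ (groups : List (List (List String))), Dom_FNAME2 groups → Pre_FNAME2 groups → Spec_FNAME2 groups (FNAME2 groups)

-- ===== LEMMAS AND PROOFS =====

theorem mem_foldl_inter {α : Type} [DecidableEq α] (rest : List (List α)) (init : List α) (x : α) :
    x ∈ rest.foldl (fun i u => PySem.Set.inter i u) init ↔ x ∈ init ∧ ∀ u ∈ rest, x ∈ u := by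
  induction rest generalizing init with
  | nil => simp
  | cons u rest ih =>
    simp only [List.foldl_cons, ih, PySem.Set.mem_inter, List.mem_cons]
    constructor
    · rintro ⟨⟨h1, h2⟩, h3⟩
      exact ⟨h1, fun v hv => hv.elim (fun e => e ▸ h2) (h3 v)⟩
    · rintro ⟨h1, h2⟩
      exact ⟨⟨h1, h2 u (Or.inl rfl)⟩, fun v hv => h2 v (Or.inr hv)⟩

theorem nodup_foldl_inter {α : Type} [DecidableEq α] (rest : List (List α)) (init : List α)
    (h : init.Nodup) : (rest.foldl (fun i u => PySem.Set.inter i u) init).Nodup := by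
  induction rest generalizing init with
  | nil => exact h
  | cons u rest ih => exact ih _ (PySem.Set.nodup_inter init u h)

theorem count_flatten_le {α : Type} [DecidableEq α] (g : List (List α)) (k : α)
    (hnd : ∀ u ∈ g, u.Nodup) : g.flatten.count k ≤ g.length := by
  induction g with
  | nil => simp
  | cons u g ih =>
    simp only [List.flatten_cons, List.count_append, List.length_cons]
    have h1 : u.count k ≤ 1 := List.nodup_iff_count_le_one.mp (hnd u (by simp)) k
    have h2 := ih (fun v hv => hnd v (List.mem_cons_of_mem _ hv))
    omega

theorem count_flatten_eq_n {α : Type} [DecidableEq α] (g : List (List α)) (k : α)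
    (hnd : ∀ u ∈ g, u.Nodup) :
    (g.flatten.count k = g.length) ↔ ∀ u ∈ g, k ∈ u := by
  induction g with
  | nil => simp
  | cons u g ih =>
    have h1 : u.count k ≤ 1 := List.nodup_iff_count_le_one.mp (hnd u (by simp)) k
    have h2 : g.flatten.count k ≤ g.length := count_flatten_le g k (fun v hv => hnd v (List.mem_cons_of_mem _ hv))
    have ih' := ih (fun v hv => hnd v (List.mem_cons_of_mem _ hv))
    have hmem : k ∈ u ↔ 0 < u.count k := List.count_pos_iff.symm
    simp only [List.flatten_cons, List.count_append, List.length_cons, List.mem_cons]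
    constructor
    · intro h
      have hcu : u.count k = 1 := by omega
      have hcg : g.flatten.count k = g.length := by omega
      exact fun v hv => hv.elim (fun e => e ▸ hmem.mpr (by omega)) (ih'.mp hcg v)
    · intro h
      have hu : u.count k = 1 := by
        have := hmem.mp (h u (Or.inl rfl)); omega
      have := ih'.mpr (fun v hv => h v (Or.inr hv))
      omega

theorem contrib_eq (g : List (List String)) (hne : g ≠ []) (hnd : ∀ u ∈ g, u.Nodup) :
    (((g.drop 1).foldl (fun i u => PySem.Set.inter i u)
        ((PySem.List.pyGet? g 0).getD [])).length : Int)
    = (((g.foldl (fun d u => u.foldl (fun d e => d.insert e (d.getD e 0 + 1)) d)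
          (PySem.Dict.empty : PySem.Dict String Int)).values.filter
            (fun c => c == (g.length : Int))).length : Int) := by
  obtain ⟨u, rest, rfl⟩ := List.exists_cons_of_ne_nil hne
  have hget : (PySem.List.pyGet? (u :: rest) 0).getD [] = u := by
    simp [PySem.List.pyGet?, PySem.List.pyIdx?]
  have hc : (u :: rest).foldl (fun d v => v.foldl (fun d e => d.insert e (d.getD e 0 + 1)) d)
      (PySem.Dict.empty : PySem.Dict String Int) = PySem.Dict.counter (u :: rest).flatten := by
    rw [← PySem.Dict.foldl_insert_getD_add_one_eq_counter, List.foldl_flatten]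
  rw [hget, hc]
  have hv : (PySem.Dict.counter (u :: rest).flatten).values
      = (PySem.Set.ofList (u :: rest).flatten).map (fun k => (List.count k (u :: rest).flatten : Int)) := by
    simp only [PySem.Dict.values, PySem.Dict.items_counter, List.map_map]
    rfl
  rw [hv, List.filter_map, List.length_map]
  congr 1
  have hI : ((u :: rest).drop 1).foldl (fun i v => PySem.Set.inter i v) u
      = rest.foldl (fun i v => PySem.Set.inter i v) u := rfl
  rw [hI]
  apply List.Perm.length_eq
  apply (List.perm_ext_iff_of_nodup
    (nodup_foldl_inter rest u (hnd u (by simp)))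
    (List.Nodup.filter _ (PySem.Set.nodup_ofList _))).mpr
  intro x
  rw [mem_foldl_inter, List.mem_filter]
  have hp : (((fun c => c == ((u :: rest).length : Int)) ∘
      fun k => (List.count k (u :: rest).flatten : Int)) x = true)
      ↔ List.count x (u :: rest).flatten = (u :: rest).length := by
    simp only [Function.comp_apply, beq_iff_eq]
    omega
  rw [hp, PySem.Set.mem_ofList]
  have hcnt := count_flatten_eq_n (u :: rest) x hnd
  constructor
  · rintro ⟨hxu, hxr⟩
    have hall : ∀ v ∈ (u :: rest), x ∈ v := fun v hv => (List.mem_cons.mp hv).elim (fun e => e ▸ hxu) (hxr v)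
    exact ⟨List.mem_flatten.mpr ⟨u, by simp, hxu⟩, hcnt.mpr hall⟩
  · rintro ⟨_, hcount⟩
    have hall := hcnt.mp hcount
    exact ⟨hall u (by simp), fun v hv => hall v (List.mem_cons_of_mem _ hv)⟩

-- ===== VERDICT (by name: the statement is the Claim_ definition above) =====
theorem FNAME2_spec : Claim_equal_FNAME2 := by
  intro groups _ hpre
  unfold Spec_FNAME2 FNAME2 FNAME2_alt
  exact PySem.List.foldl_congr_mem _ _ _ _
    (fun acc g hg => congrArg (acc + ·) (contrib_eq g (hpre.1 g hg) (hpre.2 g hg)))
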